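-- pv_equiv track=rewrite | github.com/Ireoluwa-A/Youkaryote | pathFinder.py | getBestHexInfo
-- ===== SOURCE A (Python) =====
-- def getBestHexInfo(openList,targetHex):
--     bestF = None
--     idx = 0
--     for i in range(len(openList)):
--         hexInfo = openList[i]
--         currHex = hexInfo[0]
--         if currHex == targetHex:
--             return i
--         currF = hexInfo[3]
--         if bestF == None or currF < bestF:
--             bestF = currF
--             idx = i
--     return idx
-- ===== SOURCE B (Python) =====
-- def getBestHexInfo(openList, targetHex):
--     # pass 1: early-stopping search for the target hex
--     hit = next((i for i, h in enumerate(openList) if h[0] == targetHex), None)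
--     if hit is not None:
--         return hit
--     # no target: earliest index of the minimal F value (0 for an empty list)
--     if not openList:
--         return 0
--     fs = [h[3] for h in openList]
--     return fs.index(min(fs))
-- ===== Notes on version B (the rewrite author's own statement) =====
-- stated objective: alternative
-- what changed: A fuses target search and a running min-F accumulator into one loop with early return; B first does an early-stopping target search, and only if no target is found projects out the F column and returns fs.index(min(fs)) (library min + index instead of an accumulator loop).
import Mathlib
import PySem

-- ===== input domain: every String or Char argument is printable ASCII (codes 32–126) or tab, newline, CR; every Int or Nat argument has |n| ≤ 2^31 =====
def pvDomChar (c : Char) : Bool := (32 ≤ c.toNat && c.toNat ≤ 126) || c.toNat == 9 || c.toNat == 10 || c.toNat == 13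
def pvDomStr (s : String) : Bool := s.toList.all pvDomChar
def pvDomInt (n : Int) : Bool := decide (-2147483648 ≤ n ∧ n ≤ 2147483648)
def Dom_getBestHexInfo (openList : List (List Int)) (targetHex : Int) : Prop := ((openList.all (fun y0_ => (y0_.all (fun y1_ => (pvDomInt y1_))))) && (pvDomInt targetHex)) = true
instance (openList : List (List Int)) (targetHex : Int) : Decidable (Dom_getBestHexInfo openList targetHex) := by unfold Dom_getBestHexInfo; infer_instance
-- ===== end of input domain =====

-- B replaces A's single fused loop (target search + running min-F accumulator with early return)
-- by an early-stopping target search followed, only if no target, by projecting the F column and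
-- taking the index of its minimum (library min + index). Objective: alternative (same O(n) cost).

-- ===== PORT A =====
-- A's single loop: state (bestF, idx), early return on target, h[0]/h[3] via pyGet?
-- (default 0 only outside Pre_, where Python raises IndexError).
def pvGoA (targetHex : Int) : List (List Int) → Int → Option Int → Int → Int
  | [], _, _, idx => idx
  | h :: t, i, bestF, idx =>
    let currHex := (PySem.List.pyGet? h 0).getD 0
    if currHex = targetHex then i
    else
      let currF := (PySem.List.pyGet? h 3).getD 0
      match bestF with
      | none => pvGoA targetHex t (i + 1) (some currF) i
      | some b =>
        if currF < b then pvGoA targetHex t (i + 1) (some currF) i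
        else pvGoA targetHex t (i + 1) (some b) idx

def getBestHexInfo (openList : List (List Int)) (targetHex : Int) : Int :=
  pvGoA targetHex openList 0 none 0

-- ===== PORT B =====
-- pass 1: next((i for i, h in enumerate(openList) if h[0] == targetHex), None)
def pvFindTarget (targetHex : Int) : List (List Int) → Int → Option Int
  | [], _ => none
  | h :: t, i =>
    if (PySem.List.pyGet? h 0).getD 0 = targetHex then some i
    else pvFindTarget targetHex t (i + 1)

-- fs = [h[3] for h in openList]; fs.index(min(fs))  (guarded by the emptiness test)
def getBestHexInfo_alt (openList : List (List Int)) (targetHex : Int) : Int :=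
  match pvFindTarget targetHex openList 0 with
  | some j => j
  | none =>
    if openList.isEmpty then 0
    else
      let fs := openList.map (fun h => (PySem.List.pyGet? h 3).getD 0)
      match PySem.List.min? fs (fun y => y) with
      | none => 0
      | some m => ((PySem.List.index? fs m).getD 0 : Nat)

-- ===== PRECONDITION & SPEC =====
-- helper for Pre_: Python A raises IndexError iff, scanning left of the first target hit,
-- it meets an empty list (h[0]) or a non-target list shorter than 4 (h[3]).
def pvHit (targetHex : Int) (l : List Int) : Bool := !l.isEmpty && l.headI == targetHex

-- Pre_ holds exactly when Python A returns normally: every list before (and including) the first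
-- target hit is nonempty, and every non-target list before the hit (or all, if no hit) has length ≥ 4.
def Pre_getBestHexInfo (openList : List (List Int)) (targetHex : Int) : Prop :=
  ∀ i < openList.length,
    (∀ j < i, pvHit targetHex (openList.getD j []) = false) →
      (openList.getD i [] ≠ [] ∧
        (pvHit targetHex (openList.getD i []) = true ∨ 4 ≤ (openList.getD i []).length))
instance (openList : List (List Int)) (targetHex : Int) :
    Decidable (Pre_getBestHexInfo openList targetHex) := by
  unfold Pre_getBestHexInfo; infer_instance

def pvWitness_getBestHexInfo : List (List Int) × Int := ([[1, 2, 3, 4], [0, 9, 9, 0]], 0)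

def Spec_getBestHexInfo (openList : List (List Int)) (targetHex : Int) (out : Int) : Prop := out = getBestHexInfo_alt openList targetHex
instance (openList : List (List Int)) (targetHex : Int) (out : Int) : Decidable (Spec_getBestHexInfo openList targetHex out) := by unfold Spec_getBestHexInfo; infer_instance

-- ===== CLAIM (what is proved, stated in full; the proofs are below) =====
def Claim_equal_getBestHexInfo : Prop := ∀ (openList : List (List Int)) (targetHex : Int), Dom_getBestHexInfo openList targetHex → Pre_getBestHexInfo openList targetHex → Spec_getBestHexInfo openList targetHex (getBestHexInfo openList targetHex)

-- ===== LEMMAS AND PROOFS =====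

-- Proof-side reading of A's no-hit accumulator loop (used only to characterise pvGoA; not a port).
def pvMinIdx : List Int → Int → Option Int → Int → Int
  | [], _, _, idx => idx
  | f :: t, i, bestF, idx =>
    match bestF with
    | none => pvMinIdx t (i + 1) (some f) i
    | some b =>
      if f < b then pvMinIdx t (i + 1) (some f) i
      else pvMinIdx t (i + 1) (some b) idx

-- A's fused loop = first-hit search, else the accumulator loop over the F column.
theorem pvGoA_eq (targetHex : Int) (xs : List (List Int)) :
    ∀ (i : Int) (bestF : Option Int) (idx : Int),
      pvGoA targetHex xs i bestF idx =
        (match pvFindTarget targetHex xs i with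
          | some j => j
          | none => pvMinIdx (xs.map (fun h => (PySem.List.pyGet? h 3).getD 0)) i bestF idx) := by
  induction xs with
  | nil => intro i bestF idx; simp [pvGoA, pvFindTarget, pvMinIdx]
  | cons h t ih =>
    intro i bestF idx
    by_cases hh : (PySem.List.pyGet? h 0).getD 0 = targetHex
    · simp [pvGoA, pvFindTarget, hh]
    · simp only [pvGoA, pvFindTarget, hh, List.map_cons]
      cases bestF with
      | none => simp only [pvMinIdx]; rw [ih]; simp
      | some b =>
        by_cases hc : (PySem.List.pyGet? h 3).getD 0 < b
        · simp only [pvMinIdx, if_pos hc]; rw [ih]; simp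
        · simp only [pvMinIdx, if_neg hc]; rw [ih]; simp

-- min? with the identity key on a cons, as a recursion.
theorem pvMin?_cons (x : Int) (t : List Int) :
    PySem.List.min? (x :: t) (fun y => y) =
      some (match PySem.List.min? t (fun y => y) with
        | none => x
        | some m => min x m) := by
  rw [PySem.List.min?_id_cons]
  cases t with
  | nil => simp [PySem.List.min?]
  | cons h u =>
    rw [PySem.List.min?_id_cons]
    simp only [List.foldl_cons]
    exact congrArg some (List.foldl_assoc)

-- the accumulator loop with a seeded bound equals index-of-min compared with the bound.
theorem pvMinIdx_some (fs : List Int) :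
    ∀ (i b idx : Int),
      pvMinIdx fs i (some b) idx =
        (match PySem.List.min? fs (fun y => y) with
          | none => idx
          | some m =>
            if m < b then i + ((PySem.List.index? fs m).getD 0 : Nat) else idx) := by
  induction fs with
  | nil => intro i b idx; simp [pvMinIdx, PySem.List.min?]
  | cons f t ih =>
    intro i b idx
    rw [pvMin?_cons]
    cases ht : PySem.List.min? t (fun y => y) with
    | none =>
      have ht' : t = [] := (PySem.List.min?_eq_none_iff t _).mp ht
      subst ht'
      by_cases hfb : f < b <;>
        simp [pvMinIdx, hfb]
    | some m' =>
      have hm'mem : m' ∈ t := PySem.List.min?_mem ht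
      obtain ⟨k, hk⟩ : ∃ k, PySem.List.index? t m' = some k := by
        have := (PySem.List.index?_isSome_iff t m').mpr hm'mem
        exact Option.isSome_iff_exists.mp this
      by_cases hmf : m' < f
      · have hne : f ≠ m' := fun h => absurd (h ▸ hmf) (lt_irrefl _)
        have hmin : min f m' = m' := min_eq_right (le_of_lt hmf)
        have hidx : PySem.List.index? (f :: t) m' = some (k + 1) := by
          rw [PySem.List.index?_cons_of_ne t hne, hk]; rfl
        simp only [pvMinIdx, hmin, hidx]
        by_cases hfb : f < b
        · have hmb : m' < b := lt_trans hmf hfb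
          rw [if_pos hfb, ih, ht]
          simp only [hk, if_pos hmb, Option.getD_some]
          rw [if_pos hmf]; push_cast; ring
        · rw [if_neg hfb, ih, ht]
          simp only [hk, Option.getD_some]
          by_cases hmb : m' < b
          · rw [if_pos hmb, if_pos hmb]; push_cast; ring
          · rw [if_neg hmb, if_neg hmb]
      · have hmin : min f m' = f := min_eq_left (le_of_not_gt hmf)
        simp only [pvMinIdx, hmin, PySem.List.index?_cons_self]
        by_cases hfb : f < b
        · rw [if_pos hfb, ih, ht, if_pos hfb]
          simp only [hk, Option.getD_some]
          rw [if_neg hmf]; simp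
        · rw [if_neg hfb, ih, ht, if_neg hfb]
          simp only [hk, Option.getD_some]
          rw [if_neg (fun hmb : m' < b => hfb (lt_of_le_of_lt (le_of_not_gt hmf) hmb))]

-- the accumulator loop started empty equals index-of-min (nonempty list).
theorem pvMinIdx_none (fs : List Int) (hne : fs ≠ []) (i idx : Int) :
    pvMinIdx fs i none idx =
      (match PySem.List.min? fs (fun y => y) with
        | none => idx
        | some m => i + ((PySem.List.index? fs m).getD 0 : Nat)) := by
  cases fs with
  | nil => exact absurd rfl hne
  | cons f t =>
    rw [pvMin?_cons]
    simp only [pvMinIdx]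
    rw [pvMinIdx_some]
    cases ht : PySem.List.min? t (fun y => y) with
    | none =>
      rw [PySem.List.index?_cons_self]; simp
    | some m' =>
      have hm'mem : m' ∈ t := PySem.List.min?_mem ht
      obtain ⟨k, hk⟩ : ∃ k, PySem.List.index? t m' = some k :=
        Option.isSome_iff_exists.mp ((PySem.List.index?_isSome_iff t m').mpr hm'mem)
      by_cases hmf : m' < f
      · have hne2 : f ≠ m' := fun h => absurd (h ▸ hmf) (lt_irrefl _)
        have hmin : min f m' = m' := min_eq_right (le_of_lt hmf)
        simp only [hmin, hk, Option.getD_some, if_pos hmf,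
          PySem.List.index?_cons_of_ne t hne2, Option.map_some]
        push_cast; ring
      · have hmin : min f m' = f := min_eq_left (le_of_not_gt hmf)
        simp only [hmin, if_neg hmf]
        rw [PySem.List.index?_cons_self]
        simp

-- ===== VERDICT (by name: the statement is the Claim_ definition above) =====
theorem getBestHexInfo_spec : Claim_equal_getBestHexInfo := by
  intro openList targetHex _ _
  unfold Spec_getBestHexInfo getBestHexInfo getBestHexInfo_alt
  rw [pvGoA_eq]
  cases hft : pvFindTarget targetHex openList 0 with
  | some j => simp
  | none =>
    simp only []
    cases openList with
    | nil => simp [pvMinIdx]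
    | cons h t =>
      simp only [List.isEmpty_cons, if_neg Bool.false_ne_true]
      rw [pvMinIdx_none _ (by simp) 0 0]
      cases PySem.List.min? ((h :: t).map fun h => (PySem.List.pyGet? h 3).getD 0) (fun y => y) <;> simp
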